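-- pv_equiv track=rewrite | github.com/tashakeem/IR | irProject/Vector.py | query_vectorize
-- ===== SOURCE A (Python) =====
-- def query_vectorize(terms,ext_terms):
--     output = {}
--     for item_id in terms.keys():
--         features = terms.get(item_id)
--         output_vector = []
--         for word in ext_terms:
--             if word in features.keys():
--                 output_vector.append(int(features.get(word)))
--             else:
--                 output_vector.append(0)
--         output[item_id] = output_vector
--     return output
-- ===== SOURCE B (Python) =====
-- def query_vectorize(terms, ext_terms):
--     # invert the traversal: index the vocabulary once, then scatter each item's
--     # sparse features into a zero vector
--     pos = {}
--     for i, w in enumerate(ext_terms):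
--         pos.setdefault(w, []).append(i)
--     output = {}
--     for item_id, features in terms.items():
--         vec = [0] * len(ext_terms)
--         for word, value in features.items():
--             for i in pos.get(word, []):
--                 vec[i] = int(value)
--         output[item_id] = vec
--     return output
-- ===== Notes on version B (the rewrite author's own statement) =====
-- stated objective: alternative
-- what changed: Instead of scanning the whole vocabulary per item with a dict lookup per word, B builds a word->positions index over ext_terms once, starts each item's vector as [0]*len(ext_terms), and scatters the item's sparse feature values into their positions (intended as faster; measured about 4x at mid sizes but unconfirmed at the largest, so claimed as none).
import Mathlib
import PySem

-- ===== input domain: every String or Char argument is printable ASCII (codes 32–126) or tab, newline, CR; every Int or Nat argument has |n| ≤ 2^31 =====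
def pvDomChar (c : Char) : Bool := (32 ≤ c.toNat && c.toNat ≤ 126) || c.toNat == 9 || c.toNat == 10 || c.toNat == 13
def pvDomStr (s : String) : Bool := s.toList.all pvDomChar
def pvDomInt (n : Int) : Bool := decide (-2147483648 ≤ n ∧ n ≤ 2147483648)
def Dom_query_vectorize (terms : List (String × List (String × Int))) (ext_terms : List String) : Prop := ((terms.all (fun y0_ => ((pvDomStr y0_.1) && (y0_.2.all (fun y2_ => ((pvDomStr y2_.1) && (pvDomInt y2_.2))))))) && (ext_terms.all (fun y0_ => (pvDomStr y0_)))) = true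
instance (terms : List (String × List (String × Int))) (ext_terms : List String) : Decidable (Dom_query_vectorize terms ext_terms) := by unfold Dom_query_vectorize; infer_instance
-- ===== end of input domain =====

-- B replaces A's per-item scan of the whole vocabulary (one dict lookup per word) with a
-- word→positions index over ext_terms built once, scattering each item's sparse feature values
-- into a zero vector (same return value, different traversal).

-- ===== PORT A =====
def query_vectorize (terms : List (String × List (String × Int))) (ext_terms : List String) : List (String × List Int) :=
  (((PySem.Dict.ofList terms).items.foldl (fun (output : PySem.Dict String (List Int)) itp =>
      let features : PySem.Dict String Int := PySem.Dict.ofList itp.2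
      let output_vector := ext_terms.foldl (fun acc word =>
          if features.contains word then acc ++ [features.getD word 0] else acc ++ [0]) []
      output.insert itp.1 output_vector)
    PySem.Dict.empty)).items

-- ===== PORT B =====
def query_vectorize_alt (terms : List (String × List (String × Int))) (ext_terms : List String) : List (String × List Int) :=
  let pos : PySem.Dict String (List Int) :=
    (PySem.List.enumerate ext_terms).foldl (fun d p => d.modify p.2 [] (· ++ [p.1])) PySem.Dict.empty
  (((PySem.Dict.ofList terms).items.foldl (fun (output : PySem.Dict String (List Int)) itp =>
      let features : PySem.Dict String Int := PySem.Dict.ofList itp.2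
      let vec := features.items.foldl (fun v q =>
          (pos.getD q.1 []).foldl (fun v i => PySem.List.pySetD v i q.2) v)
        (List.replicate ext_terms.length 0)
      output.insert itp.1 vec)
    PySem.Dict.empty)).items

-- ===== PRECONDITION & SPEC =====
def Spec_query_vectorize (terms : List (String × List (String × Int))) (ext_terms : List String) (out : List (String × List Int)) : Prop := out = query_vectorize_alt terms ext_terms
instance (terms : List (String × List (String × Int))) (ext_terms : List String) (out : List (String × List Int)) : Decidable (Spec_query_vectorize terms ext_terms out) := by unfold Spec_query_vectorize; infer_instance

-- ===== CLAIM (what is proved, stated in full; the proofs are below) =====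
def Claim_equal_query_vectorize : Prop := ∀ (terms : List (String × List (String × Int))) (ext_terms : List String), Dom_query_vectorize terms ext_terms → Spec_query_vectorize terms ext_terms (query_vectorize terms ext_terms)

-- ===== LEMMAS AND PROOFS =====

theorem pv_set_mid {α : Type} (pre : List α) (x v : α) (rest : List α) :
    (pre ++ x :: rest).set pre.length v = pre ++ v :: rest := by
  induction pre with
  | nil => rfl
  | cons a pre ih => simp [ih]

theorem pv_scatter_one (w : String) (val : Int) :
    ∀ (ts : List String) (g : String → Int) (pre : List Int) (s : Int), s = (pre.length : Int) →
    ((((PySem.List.enumerate ts s).filter (fun p => p.2 == w)).map (·.1)).foldl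
        (fun v i => PySem.List.pySetD v i val) (pre ++ ts.map g))
      = pre ++ ts.map (fun w' => if w' = w then val else g w') := by
  intro ts
  induction ts with
  | nil => intro g pre s hs; simp
  | cons t ts ih =>
    intro g pre s hs
    rw [PySem.List.enumerate_cons, List.filter_cons]
    by_cases ht : t = w
    · subst ht
      simp only [beq_self_eq_true, if_pos, List.map_cons, List.foldl_cons]
      rw [hs, PySem.List.pySetD_natCast, pv_set_mid]
      have h1 : pre ++ val :: ts.map g = (pre ++ [val]) ++ ts.map g := by simp
      rw [h1, ih g (pre ++ [val]) (↑pre.length + 1) (by simp)]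
      simp
    · have hb : (((s, t) : Int × String).2 == w) = false := by simpa using ht
      rw [hb]
      simp only [if_neg Bool.false_ne_true, List.map_cons]
      have h1 : pre ++ g t :: ts.map g = (pre ++ [g t]) ++ ts.map g := by simp
      rw [h1, ih g (pre ++ [g t]) (s + 1) (by simp [hs])]
      simp [ht]

theorem pv_scatter_all (ts : List String) :
    ∀ (fs : List (String × Int)) (g : String → Int), (fs.map (·.1)).Nodup →
    fs.foldl (fun v q =>
        ((((PySem.List.enumerate ts).filter (fun p => p.2 == q.1)).map (·.1)).foldl
          (fun v i => PySem.List.pySetD v i q.2) v)) (ts.map g)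
      = ts.map (fun w => match fs.find? (fun q => q.1 == w) with | some q => q.2 | none => g w) := by
  intro fs
  induction fs with
  | nil => intro g _; simp
  | cons q fs ih =>
    intro g hnd
    simp only [List.map_cons] at hnd
    obtain ⟨hq, hnd'⟩ := List.nodup_cons.mp hnd
    simp only [List.foldl_cons]
    have h1 := pv_scatter_one q.1 q.2 ts g [] 0 (by simp)
    simp only [List.nil_append] at h1
    rw [h1]
    rw [ih _ hnd']
    apply List.map_congr_left
    intro w _
    by_cases hw : w = q.1
    · have hnone : fs.find? (fun p => p.1 == w) = none := by
        apply List.find?_eq_none.mpr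
        intro x hx
        simp only [beq_iff_eq]
        intro h
        exact hq (by rw [← hw, ← h]; exact List.mem_map.2 ⟨x, hx, rfl⟩)
      rw [hw] at hnone
      simp [List.find?, hw, hnone]
    · have hb : (q.1 == w) = false := by simpa using fun h => hw h.symm
      simp only [List.find?, hb]
      cases h : fs.find? (fun p => p.1 == w) <;> simp [hw]

theorem pv_dict_lookup (d : PySem.Dict String Int) (w : String) :
    (if d.contains w then d.getD w 0 else 0)
      = match d.items.find? (fun q => q.1 == w) with | some q => q.2 | none => 0 := by
  cases h : d.items.find? (fun q => q.1 == w) with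
  | none =>
      have hc : d.contains w = false := by
        simp only [PySem.Dict.contains, List.any_eq_false]
        intro p hp
        have := List.find?_eq_none.mp h p hp
        simpa using this
      simp [hc]
  | some p =>
      have hc : d.contains w = true := by
        simp only [PySem.Dict.contains, List.any_eq_true]
        exact ⟨p, List.mem_of_find?_eq_some h, by simpa using List.find?_some h⟩
      have hg : d.getD w 0 = p.2 := by
        simp [PySem.Dict.getD, PySem.Dict.get?, h]
      simp [hc, hg]

theorem pv_A_vec (d : PySem.Dict String Int) (ts : List String) :
    ts.foldl (fun acc word => if d.contains word then acc ++ [d.getD word 0] else acc ++ [0]) []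
      = ts.map (fun w => if d.contains w then d.getD w 0 else 0) := by
  rw [PySem.List.foldl_congr_mem ts _ (fun acc w => acc ++ [if d.contains w then d.getD w 0 else 0]) []
      (by intro acc x _; by_cases h : d.contains x <;> simp [h]),
     PySem.List.foldl_append_singleton_eq_map]
  simp

theorem pv_pos_getD (ts : List String) (w : String) :
    ((PySem.List.enumerate ts).foldl (fun d p => d.modify p.2 [] (· ++ [p.1])) PySem.Dict.empty).getD w []
      = ((PySem.List.enumerate ts).filter (fun p => p.2 == w)).map (·.1) := by
  have h : (PySem.List.enumerate ts).foldl (fun d p => d.modify p.2 [] (· ++ [p.1])) PySem.Dict.empty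
      = ((PySem.List.enumerate ts).map (fun p => (p.2, p.1))).foldl (fun d q => d.modify q.1 [] (· ++ [q.2])) PySem.Dict.empty := by
    rw [List.foldl_map]
  rw [h, PySem.Dict.getD_foldl_modify_append]
  simp [List.filter_map, Function.comp_def, List.map_map]

theorem pv_main (terms : List (String × List (String × Int))) (ext_terms : List String) :
    (((PySem.Dict.ofList terms).items.foldl (fun (output : PySem.Dict String (List Int)) itp =>
      let features : PySem.Dict String Int := PySem.Dict.ofList itp.2
      let output_vector := ext_terms.foldl (fun acc word =>
          if features.contains word then acc ++ [features.getD word 0] else acc ++ [0]) []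
      output.insert itp.1 output_vector)
    PySem.Dict.empty)).items
    =
    (let pos : PySem.Dict String (List Int) :=
      (PySem.List.enumerate ext_terms).foldl (fun d p => d.modify p.2 [] (· ++ [p.1])) PySem.Dict.empty
    (((PySem.Dict.ofList terms).items.foldl (fun (output : PySem.Dict String (List Int)) itp =>
        let features : PySem.Dict String Int := PySem.Dict.ofList itp.2
        let vec := features.items.foldl (fun v q =>
            (pos.getD q.1 []).foldl (fun v i => PySem.List.pySetD v i q.2) v)
          (List.replicate ext_terms.length 0)
        output.insert itp.1 vec)
      PySem.Dict.empty)).items) := by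
  dsimp only
  apply congrArg PySem.Dict.items
  apply PySem.List.foldl_congr_mem
  intro output itp _
  apply congrArg (output.insert itp.1)
  rw [pv_A_vec]
  have hrep : (List.replicate ext_terms.length (0:Int)) = ext_terms.map (fun _ => 0) := by
    simp
  rw [hrep]
  rw [PySem.List.foldl_congr_mem (PySem.Dict.ofList itp.2).items _
      (fun v q => ((((PySem.List.enumerate ext_terms).filter (fun p => p.2 == q.1)).map (·.1)).foldl
          (fun v i => PySem.List.pySetD v i q.2) v))
      (ext_terms.map (fun _ => 0))
      (by intro v q _; rw [pv_pos_getD])]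
  rw [pv_scatter_all ext_terms (PySem.Dict.ofList itp.2).items (fun _ => 0)
      (by simpa [PySem.Dict.keys] using PySem.Dict.nodup_keys_ofList itp.2)]
  apply List.map_congr_left
  intro w _
  exact pv_dict_lookup (PySem.Dict.ofList itp.2) w

-- ===== VERDICT (by name: the statement is the Claim_ definition above) =====
theorem query_vectorize_spec : Claim_equal_query_vectorize := by
  intro terms ext_terms _
  exact pv_main terms ext_terms
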